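-- pv_equiv track=rewrite | github.com/vladsuper5555/pythonProgramming | lab2.py | problema9
-- ===== SOURCE A (Python) =====
-- import copy
--
-- def problema9(matrix):
--     maxMatrix = copy.deepcopy(matrix)
--     answers = []
--     for line in range(1, len(matrix)):
--         for col in range(0, len(matrix[0])):
--             if matrix[line][col] <= maxMatrix[line - 1][col]:
--                 answers.append((line, col))
--             maxMatrix[line][col] = max(maxMatrix[line - 1][col], matrix[line][col])
--
--
--     return answers
-- ===== SOURCE B (Python) =====
-- def problema9(matrix):
--     return [(line, col)
--             for line in range(1, len(matrix))
--             for col in range(len(matrix[0]))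
--             if matrix[line][col] <= max(matrix[k][col] for k in range(line))]
-- ===== Notes on version B (the rewrite author's own statement) =====
-- stated objective: alternative
-- what changed: B keeps no state at all: a single comprehension that, for every cell, recomputes the maximum of the whole column above it directly, instead of A's incremental running-max matrix built row by row.
import Mathlib
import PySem

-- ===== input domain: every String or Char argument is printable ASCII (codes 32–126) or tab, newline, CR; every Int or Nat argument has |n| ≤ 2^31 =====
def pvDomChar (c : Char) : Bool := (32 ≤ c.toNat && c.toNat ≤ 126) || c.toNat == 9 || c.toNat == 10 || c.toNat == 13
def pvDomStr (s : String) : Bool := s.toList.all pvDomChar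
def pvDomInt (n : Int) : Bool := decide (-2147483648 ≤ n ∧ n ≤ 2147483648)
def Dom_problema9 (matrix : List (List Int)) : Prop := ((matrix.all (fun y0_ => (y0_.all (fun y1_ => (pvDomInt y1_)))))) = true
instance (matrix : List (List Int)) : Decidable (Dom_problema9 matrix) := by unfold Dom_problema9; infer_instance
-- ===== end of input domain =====

-- B is an alternative implementation: a stateless comprehension that recomputes, for each
-- cell, the maximum of the whole column above it, instead of A's incremental running-max matrix.

-- ===== PORT A =====
-- body of A's inner loop: one column step for a fixed line, over state (maxMatrix, answers)
def aStep (matrix : List (List Int)) (line : Int)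
    (st : List (List Int) × List (Int × Int)) (col : Int) :
    List (List Int) × List (Int × Int) :=
  let mv := PySem.List.pyGetD (PySem.List.pyGetD matrix line []) col 0
  let pv := PySem.List.pyGetD (PySem.List.pyGetD st.1 (line - 1) []) col 0
  let ans := if mv ≤ pv then st.2 ++ [(line, col)] else st.2
  let maxM := PySem.List.pySetD st.1 line
    (PySem.List.pySetD (PySem.List.pyGetD st.1 line []) col (max pv mv))
  (maxM, ans)

-- one iteration of A's outer loop: for col in range(0, len(matrix[0]))
def aLine (matrix : List (List Int)) (st : List (List Int) × List (Int × Int)) (line : Int) :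
    List (List Int) × List (Int × Int) :=
  List.foldl (aStep matrix line) st
    (PySem.List.pyRange 0 ((PySem.List.pyGetD matrix 0 []).length : Int) 1)

def problema9 (matrix : List (List Int)) : List (Int × Int) :=
  -- maxMatrix = copy.deepcopy(matrix); answers = []; for line in range(1, len(matrix)): …
  (List.foldl (aLine matrix) (matrix, ([] : List (Int × Int)))
    (PySem.List.pyRange 1 (matrix.length : Int) 1)).2

-- ===== PORT B =====
-- [(line, col) for line in range(1, len(matrix)) for col in range(len(matrix[0]))
--              if matrix[line][col] <= max(matrix[k][col] for k in range(line))]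
-- (Python's max raises on an empty iterable; here line ≥ 1 so the generator is never
--  empty and max?'s default is never consumed.)
def problema9_alt (matrix : List (List Int)) : List (Int × Int) :=
  (PySem.List.pyRange 1 (matrix.length : Int) 1).flatMap (fun line =>
    (PySem.List.pyRange 0 ((PySem.List.pyGetD matrix 0 []).length : Int) 1).filterMap (fun col =>
      let above := (PySem.List.pyRange 0 line 1).map
        (fun k => PySem.List.pyGetD (PySem.List.pyGetD matrix k []) col 0)
      let m := (PySem.List.max? above (fun x => x)).getD 0
      if PySem.List.pyGetD (PySem.List.pyGetD matrix line []) col 0 ≤ m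
        then some (line, col) else none))

-- ===== PRECONDITION & SPEC =====
-- Pre_ excludes exactly the ragged matrices on which both Pythons raise IndexError:
-- some row is shorter than the first row, so matrix[line][col] fails for some col < len(matrix[0]).
def Pre_problema9 (matrix : List (List Int)) : Prop :=
  ∀ r ∈ matrix, (matrix.headD []).length ≤ r.length
instance (matrix : List (List Int)) : Decidable (Pre_problema9 matrix) := by
  unfold Pre_problema9; infer_instance

def pvWitness_problema9 : List (List Int) := [[1, 2], [0, 3], [5, 1]]

def Spec_problema9 (matrix : List (List Int)) (out : List (Int × Int)) : Prop := out = problema9_alt matrix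
instance (matrix : List (List Int)) (out : List (Int × Int)) : Decidable (Spec_problema9 matrix out) := by unfold Spec_problema9; infer_instance

-- ===== CLAIM (what is proved, stated in full; the proofs are below) =====
def Claim_equal_problema9 : Prop := ∀ (matrix : List (List Int)), Dom_problema9 matrix → Pre_problema9 matrix → Spec_problema9 matrix (problema9 matrix)

-- ===== LEMMAS AND PROOFS =====

-- entry of the matrix at row l, column c (0 when out of range; Pre_ keeps accesses in range)
def gIdx (M : List (List Int)) (l c : Nat) : Int := (M.getD l []).getD c 0

-- running column maximum of column c over rows 0..l
def cmx (M : List (List Int)) : Nat → Nat → Int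
  | 0, c => gIdx M 0 c
  | l + 1, c => max (cmx M l c) (gIdx M (l + 1) c)

-- the pairs emitted for row l (l ≥ 1), in column order
def rowlist (M : List (List Int)) (l : Nat) : List (Int × Int) :=
  (List.range (M.headD []).length).filterMap
    (fun c => if gIdx M l c ≤ cmx M (l - 1) c then some ((l : Int), (c : Int)) else none)

-- canonical value both programs compute
def canon (M : List (List Int)) : List (Int × Int) :=
  (List.range' 1 (M.length - 1)).flatMap (fun l => rowlist M l)

lemma pyRange_cast_add (a n : Nat) :
    PySem.List.pyRange (a : Int) ((a + n : Nat) : Int) 1 = (List.range' a n).map Int.ofNat := by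
  induction n with
  | zero => simp [PySem.List.pyRange]
  | succ n ih =>
    have h1 : ((a + (n + 1) : Nat) : Int) = ((a + n : Nat) : Int) + 1 := by push_cast; ring
    rw [h1, PySem.List.pyRange_one_succ_right (by push_cast; omega), ih, List.range'_1_concat]
    simp

lemma pyRange_cast (a b : Nat) :
    PySem.List.pyRange (a : Int) (b : Int) 1 = (List.range' a (b - a)).map Int.ofNat := by
  rcases Nat.le_total a b with h | h
  · have h2 : (b : Int) = ((a + (b - a) : Nat) : Int) := by omega
    rw [h2, pyRange_cast_add]
  · have h0 : b - a = 0 := by omega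
    rw [h0]
    have : PySem.List.pyRange (a : Int) (b : Int) 1 = [] := by
      simp [PySem.List.pyRange]; omega
    simp [this]

lemma headD_eq_pyGetD (M : List (List Int)) :
    PySem.List.pyGetD M 0 [] = M.headD [] := by
  have h0 : ((0 : Nat) : Int) = (0 : Int) := rfl
  rw [← h0, PySem.List.pyGetD_natCast]
  cases M <;> simp

lemma rowlen (M : List (List Int)) (hP : Pre_problema9 M) (l : Nat) (hl : l < M.length) :
    (M.headD []).length ≤ (M.getD l []).length := by
  apply hP
  rw [List.getD_eq_getElem _ _ hl]
  exact List.getElem_mem hl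

-- getD-of-set helpers
lemma getD_set_self {α : Type} (xs : List α) (n : Nat) (v d : α) (h : n < xs.length) :
    (xs.set n v).getD n d = v := by
  simp [List.getD, h]

lemma getD_set_other {α : Type} (xs : List α) (n i : Nat) (v d : α) (h : i ≠ n) :
    (xs.set n v).getD i d = xs.getD i d := by
  simp [List.getD, Ne.symm h]

-- ---------- A side ----------

lemma aInner_fold (M : List (List Int)) (hP : Pre_problema9 M) (l : Nat)
    (hl1 : 1 ≤ l) (hln : l < M.length) :
    ∀ (k j : Nat), j + k ≤ (M.headD []).length →
    ∀ (maxM : List (List Int)) (ans : List (Int × Int)),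
    maxM.length = M.length →
    (∀ c, c < (M.headD []).length → (maxM.getD (l - 1) []).getD c 0 = cmx M (l - 1) c) →
    (maxM.getD l []).length = (M.getD l []).length →
    (let r := List.foldl (aStep M (l : Int)) (maxM, ans) ((List.range' j k).map Int.ofNat)
     r.2 = ans ++ (List.range' j k).filterMap
        (fun c => if gIdx M l c ≤ cmx M (l - 1) c then some ((l : Int), (c : Int)) else none) ∧
     r.1.length = M.length ∧
     (∀ i, i ≠ l → r.1.getD i [] = maxM.getD i []) ∧
     (r.1.getD l []).length = (maxM.getD l []).length ∧
     (∀ c, c < j ∨ j + k ≤ c → (r.1.getD l []).getD c 0 = (maxM.getD l []).getD c 0) ∧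
     (∀ c, j ≤ c → c < j + k → (r.1.getD l []).getD c 0 = cmx M l c)) := by
  intro k
  induction k with
  | zero =>
    intro j hjk maxM ans h1 h2 h3
    refine ⟨by simp, by simpa using h1, fun i _ => by simp, by simp, fun c _ => by simp,
      fun c hc1 hc2 => by omega⟩
  | succ k ih =>
    intro j hjk maxM ans h1 h2 h3
    have hjcols : j < (M.headD []).length := by omega
    have hjrow : j < (maxM.getD l []).length := by
      have := rowlen M hP l hln
      omega
    have hlmax : l < maxM.length := by omega
    have hlsucc : l = (l - 1) + 1 := by omega
    have hcm : max (cmx M (l - 1) j) (gIdx M l j) = cmx M l j := by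
      conv_rhs => rw [hlsucc]
      rw [cmx, ← hlsucc]
    have hstep : aStep M (l : Int) (maxM, ans) (j : Int) =
        (maxM.set l ((maxM.getD l []).set j (cmx M l j)),
         if gIdx M l j ≤ cmx M (l - 1) j then ans ++ [((l : Int), (j : Int))] else ans) := by
      unfold aStep
      have hl' : ((l : Int) - 1) = ((l - 1 : Nat) : Int) := by omega
      simp only [hl', PySem.List.pyGetD_natCast, PySem.List.pySetD_natCast]
      rw [h2 j hjcols]
      simp only [gIdx] at hcm
      rw [hcm]
      simp only [gIdx]
      rfl
    rw [List.range'_succ, List.map_cons, List.foldl_cons]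
    simp only [Int.ofNat_eq_natCast]
    rw [hstep]
    have h1' : (maxM.set l ((maxM.getD l []).set j (cmx M l j))).length = M.length := by
      simpa using h1
    have h2' : ∀ c, c < (M.headD []).length →
        ((maxM.set l ((maxM.getD l []).set j (cmx M l j))).getD (l - 1) []).getD c 0
          = cmx M (l - 1) c := by
      intro c hc
      rw [getD_set_other _ _ _ _ _ (by omega)]
      exact h2 c hc
    have h3' : ((maxM.set l ((maxM.getD l []).set j (cmx M l j))).getD l []).length
        = (M.getD l []).length := by
      rw [getD_set_self _ _ _ _ hlmax, List.length_set]
      exact h3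
    obtain ⟨ih1, ih2, ih3, ih4, ih5, ih6⟩ := ih (j + 1) (by omega) _ _ h1' h2' h3'
    refine ⟨?_, ih2, ?_, ?_, ?_, ?_⟩
    · rw [ih1, List.filterMap_cons]
      by_cases hc : gIdx M l j ≤ cmx M (l - 1) j <;> simp [hc]
    · intro i hi
      rw [ih3 i hi, getD_set_other _ _ _ _ _ hi]
    · rw [ih4, getD_set_self _ _ _ _ hlmax, List.length_set]
    · intro c hc
      have hcne : c ≠ j := by omega
      rw [ih5 c (by omega), getD_set_self _ _ _ _ hlmax,
        getD_set_other _ _ _ _ _ hcne]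
    · intro c hc1 hc2
      rcases Nat.eq_or_lt_of_le hc1 with hceq | hclt
      · subst hceq
        rw [ih5 j (by omega), getD_set_self _ _ _ _ hlmax, getD_set_self _ _ _ _ hjrow]
      · exact ih6 c (by omega) (by omega)

lemma aOuter_fold (M : List (List Int)) (hP : Pre_problema9 M) :
    ∀ (k j : Nat), 1 ≤ j → j + k ≤ M.length →
    ∀ (maxM : List (List Int)) (ans : List (Int × Int)),
    maxM.length = M.length →
    (∀ c, c < (M.headD []).length → (maxM.getD (j - 1) []).getD c 0 = cmx M (j - 1) c) →
    (∀ i, j ≤ i → maxM.getD i [] = M.getD i []) →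
    (List.foldl (aLine M) (maxM, ans) ((List.range' j k).map Int.ofNat)).2
      = ans ++ (List.range' j k).flatMap (fun l => rowlist M l) := by
  intro k
  induction k with
  | zero => intro j hj hjk maxM ans h1 h2 h3; simp
  | succ k ih =>
    intro j hj hjk maxM ans h1 h2 h3
    have hjn : j < M.length := by omega
    rw [List.range'_succ, List.map_cons, List.foldl_cons]
    simp only [Int.ofNat_eq_natCast]
    have hrange : PySem.List.pyRange 0 ((PySem.List.pyGetD M 0 []).length : Int) 1
        = (List.range' 0 (M.headD []).length).map Int.ofNat := by
      rw [headD_eq_pyGetD]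
      have h := pyRange_cast 0 (M.headD []).length
      simpa using h
    have hline : aLine M (maxM, ans) (j : Int)
        = List.foldl (aStep M (j : Int)) (maxM, ans)
            ((List.range' 0 (M.headD []).length).map Int.ofNat) := by
      unfold aLine; rw [hrange]
    rw [hline]
    obtain ⟨i1, i2, i3, i4, i5, i6⟩ :=
      aInner_fold M hP j hj hjn (M.headD []).length 0 (by omega) maxM ans h1 h2
        (by rw [h3 j le_rfl])
    rw [ih (j + 1) (by omega) (by omega) _ _ i2 ?_ ?_]
    · rw [i1, List.flatMap_cons]
      unfold rowlist
      rw [List.range_eq_range', List.append_assoc]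
    · intro c hc
      have : j + 1 - 1 = j := by omega
      rw [this]
      exact i6 c (Nat.zero_le c) (by omega)
    · intro i hi
      rw [i3 i (by omega)]
      exact h3 i (by omega)

lemma A_eq_canon (M : List (List Int)) (hP : Pre_problema9 M) :
    problema9 M = canon M := by
  unfold problema9 canon
  rcases Nat.lt_or_ge M.length 1 with h | h
  · have h0 : M.length = 0 := by omega
    rw [h0]
    have hr : PySem.List.pyRange 1 ((0 : Nat) : Int) 1 = [] := by
      simp [PySem.List.pyRange]
    simp only [Nat.cast_zero] at hr ⊢
    rw [hr]
    simp
  · have hr : PySem.List.pyRange 1 (M.length : Int) 1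
        = (List.range' 1 (M.length - 1)).map Int.ofNat := by
      have h := pyRange_cast 1 M.length
      simpa using h
    rw [hr, aOuter_fold M hP (M.length - 1) 1 le_rfl (by omega) M [] rfl
      (fun c _ => rfl) (fun i _ => rfl)]
    simp

-- ---------- B side ----------

-- the brute-force maximum over rows 0..l of column c equals the running column maximum
lemma bruteMax_eq_cmx (M : List (List Int)) (c : Nat) :
    ∀ l : Nat, ((List.range' 1 l).map (fun k => gIdx M k c)).foldl max (gIdx M 0 c)
      = cmx M l c := by
  intro l
  induction l with
  | zero => simp [cmx]
  | succ l ih =>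
    rw [List.range'_1_concat, List.map_append, List.foldl_append, ih]
    simp [cmx, Nat.add_comm]

lemma bCell (M : List (List Int)) (l c : Nat) (hl : 1 ≤ l) :
    (PySem.List.max? ((PySem.List.pyRange 0 (l : Int) 1).map
        (fun k => PySem.List.pyGetD (PySem.List.pyGetD M k []) c 0)) (fun x => x)).getD 0
      = cmx M (l - 1) c := by
  obtain ⟨m, rfl⟩ : ∃ m, l = m + 1 := ⟨l - 1, by omega⟩
  have hr : PySem.List.pyRange 0 ((m + 1 : Nat) : Int) 1
      = (List.range' 0 (m + 1)).map Int.ofNat := by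
    have h := pyRange_cast 0 (m + 1)
    simpa using h
  have hmap : ∀ k : Nat,
      PySem.List.pyGetD (PySem.List.pyGetD M ((k : Int)) []) (c : Int) 0 = gIdx M k c := by
    intro k
    rw [PySem.List.pyGetD_natCast, PySem.List.pyGetD_natCast]
    rfl
  rw [hr, List.range'_succ, List.map_cons, List.map_cons, List.map_map, Int.ofNat_eq_natCast,
    hmap 0, PySem.List.max?_id_cons]
  simp only [Option.getD_some, Nat.add_sub_cancel]
  have hcomp : ((List.range' (0 + 1) m).map Int.ofNat).map
      (fun k => PySem.List.pyGetD (PySem.List.pyGetD M k []) (c : Int) 0)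
      = (List.range' 1 m).map (fun k => gIdx M k c) := by
    rw [List.map_map]
    simp only [zero_add]
    apply List.map_congr_left
    intro k _
    exact hmap k
  rw [List.map_map] at hcomp
  rw [hcomp]
  exact bruteMax_eq_cmx M c m

lemma B_eq_canon (M : List (List Int)) :
    problema9_alt M = canon M := by
  unfold problema9_alt canon
  have hrout : PySem.List.pyRange 1 (M.length : Int) 1
      = (List.range' 1 (M.length - 1)).map Int.ofNat := by
    have h := pyRange_cast 1 M.length
    simpa using h
  have hrin : PySem.List.pyRange 0 ((PySem.List.pyGetD M 0 []).length : Int) 1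
      = (List.range' 0 (M.headD []).length).map Int.ofNat := by
    rw [headD_eq_pyGetD]
    have h := pyRange_cast 0 (M.headD []).length
    simpa using h
  rw [hrout, hrin, List.flatMap_map]
  apply List.flatMap_congr
  intro l hl
  have hl1 : 1 ≤ l := (List.mem_range'_1.mp hl).1
  unfold rowlist
  rw [List.range_eq_range', List.filterMap_map]
  apply List.filterMap_congr
  intro c _
  simp only [Function.comp, Int.ofNat_eq_natCast]
  rw [bCell M l c hl1, PySem.List.pyGetD_natCast, PySem.List.pyGetD_natCast]
  rfl

-- ===== VERDICT (by name: the statement is the Claim_ definition above) =====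
theorem problema9_spec : Claim_equal_problema9 := by
  intro M _ hPre
  unfold Spec_problema9
  rw [A_eq_canon M hPre, B_eq_canon M]
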